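-- pv_equiv track=rewrite | github.com/PaddlePaddle/PaddleNLP | legacy/model_zoo/ernie-health/cblue/deploy/serving/simple_serving/server_ner.py | _extract_chunk
-- ===== SOURCE A (Python) =====
-- def _extract_chunk(tokens):
--     chunks = set()
--     start_idx, cur_idx = 0, 0
--     while cur_idx < len(tokens):
--         if tokens[cur_idx][0] == "B":
--             start_idx = cur_idx
--             cur_idx += 1
--             while cur_idx < len(tokens) and tokens[cur_idx][0] == "I":
--                 if tokens[cur_idx][2:] == tokens[start_idx][2:]:
--                     cur_idx += 1
--                 else:
--                     break
--             if cur_idx < len(tokens) and tokens[cur_idx][0] == "E":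
--                 if tokens[cur_idx][2:] == tokens[start_idx][2:]:
--                     chunks.add((tokens[cur_idx][2:], start_idx - 1, cur_idx))
--                     cur_idx += 1
--         elif tokens[cur_idx][0] == "S":
--             chunks.add((tokens[cur_idx][2:], cur_idx - 1, cur_idx))
--             cur_idx += 1
--         else:
--             cur_idx += 1
--     return list(chunks)
-- ===== SOURCE B (Python) =====
-- def _extract_chunk(tokens):
--     chunks = set()
--     for j, tag in enumerate(tokens):
--         if tag[0] == "S":
--             chunks.add((tag[2:], j - 1, j))
--         elif tag[0] == "E":
--             t = tag[2:]
--             i = j - 1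
--             while i >= 0 and tokens[i][0] == "I" and tokens[i][2:] == t:
--                 i -= 1
--             if i >= 0 and tokens[i][0] == "B" and tokens[i][2:] == t:
--                 chunks.add((t, i - 1, j))
--     return list(chunks)
-- ===== Notes on version B (the rewrite author's own statement) =====
-- stated objective: alternative
-- what changed: A's forward two-pointer scan (outer while with an inner while consuming each I-run after a B, then re-processing the stop token) is replaced by a single flat enumerate loop that treats every position independently: at each E tag a backward scan over the preceding I-run verifies and locates the matching B, and S tags emit directly.
import Mathlib
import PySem

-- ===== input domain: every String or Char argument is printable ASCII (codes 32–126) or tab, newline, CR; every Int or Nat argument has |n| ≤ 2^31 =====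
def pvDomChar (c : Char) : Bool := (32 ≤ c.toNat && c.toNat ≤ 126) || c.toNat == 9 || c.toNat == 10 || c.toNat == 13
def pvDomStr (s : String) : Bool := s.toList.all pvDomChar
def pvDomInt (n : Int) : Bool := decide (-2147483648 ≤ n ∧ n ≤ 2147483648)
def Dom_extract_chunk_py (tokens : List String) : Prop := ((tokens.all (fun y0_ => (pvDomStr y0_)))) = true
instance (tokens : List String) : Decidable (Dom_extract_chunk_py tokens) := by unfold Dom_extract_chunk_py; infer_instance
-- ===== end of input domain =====

-- B replaces A's forward two-pointer (inner while consuming an I-run after each B) by an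
-- independent per-position check: at each E tag a backward scan verifies the B..I*..E chunk.
-- Objective: alternative decomposition, same return value (the set of chunks, listed in the same order).

-- tag[0] (none = empty string, where Python raises; excluded by Pre_)
def pvHd (s : String) : Option Char := PySem.Str.pyGet? s 0
-- tag[2:] as a list of code points (exact: PySem.List.slice on s.toList)
def pvSfx (s : String) : List Char := PySem.List.slice s.toList (some 2) none

-- ===== PORT A =====
-- the inner `while cur_idx < len(tokens) and tokens[cur_idx][0] == "I": if suffix matches: cur_idx += 1 else: break`
def pvInnerA (tokens : List String) (suf : List Char) (cur : Nat) : Nat :=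
  match _h : tokens[cur]? with
  | some t =>
      if pvHd t = some 'I' ∧ pvSfx t = suf then pvInnerA tokens suf (cur + 1) else cur
  | none => cur
termination_by tokens.length - cur
decreasing_by
  have : cur < tokens.length := by
    by_contra hc
    simp [List.getElem?_eq_none (le_of_not_gt hc)] at _h
  omega

lemma pvInnerA_ge (tokens : List String) (suf : List Char) (cur : Nat) :
    cur ≤ pvInnerA tokens suf cur := by
  fun_induction pvInnerA tokens suf cur with
  | case1 t h hm ih => omega
  | case2 t h hm => omega
  | case3 h => omega

-- the outer `while cur_idx < len(tokens): …`
def pvLoopA (tokens : List String) (cur : Nat) (acc : List (String × Int × Int)) :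
    List (String × Int × Int) :=
  match _h : tokens[cur]? with
  | none => acc
  | some t =>
    if pvHd t = some 'B' then
      -- start_idx = cur; pvInnerA consumes the I-run, giving the new cur_idx
      match _h2 : tokens[pvInnerA tokens (pvSfx t) (cur + 1)]? with
      | some u =>
        if pvHd u = some 'E' ∧ pvSfx u = pvSfx t then
          pvLoopA tokens (pvInnerA tokens (pvSfx t) (cur + 1) + 1)
            (PySem.Set.add acc
              (String.ofList (pvSfx u), (cur : Int) - 1, (pvInnerA tokens (pvSfx t) (cur + 1) : Int)))
        else pvLoopA tokens (pvInnerA tokens (pvSfx t) (cur + 1)) acc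
      | none => acc
    else if pvHd t = some 'S' then
      pvLoopA tokens (cur + 1) (PySem.Set.add acc (String.ofList (pvSfx t), (cur : Int) - 1, (cur : Int)))
    else pvLoopA tokens (cur + 1) acc
termination_by tokens.length - cur
decreasing_by
  · have h1 : cur < tokens.length := by
      by_contra hc; simp [List.getElem?_eq_none (le_of_not_gt hc)] at _h
    have h2 := pvInnerA_ge tokens (pvSfx t) (cur + 1)
    omega
  · have h1 : cur < tokens.length := by
      by_contra hc; simp [List.getElem?_eq_none (le_of_not_gt hc)] at _h
    have h2 := pvInnerA_ge tokens (pvSfx t) (cur + 1)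
    omega
  · have h1 : cur < tokens.length := by
      by_contra hc; simp [List.getElem?_eq_none (le_of_not_gt hc)] at _h
    omega
  · have h1 : cur < tokens.length := by
      by_contra hc; simp [List.getElem?_eq_none (le_of_not_gt hc)] at _h
    omega

def extract_chunk_py (tokens : List String) : List (String × Int × Int) :=
  pvLoopA tokens 0 PySem.Set.empty

-- ===== PORT B =====
-- `i = j - 1; while i >= 0 and tokens[i][0] == "I" and tokens[i][2:] == t: i -= 1`
-- (argument and result are i + 1, so 0 means i fell to -1)
def pvBackB (tokens : List String) (suf : List Char) : Nat → Nat
  | 0 => 0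
  | (i + 1) =>
      match tokens[i]? with
      | some t => if pvHd t = some 'I' ∧ pvSfx t = suf then pvBackB tokens suf i else i + 1
      | none => i + 1

-- the body of `for j, tag in enumerate(tokens)`
def pvStepB (tokens : List String) (acc : List (String × Int × Int)) (j : Nat) (tag : String) :
    List (String × Int × Int) :=
  if pvHd tag = some 'S' then
    PySem.Set.add acc (String.ofList (pvSfx tag), (j : Int) - 1, (j : Int))
  else if pvHd tag = some 'E' then
    let k := pvBackB tokens (pvSfx tag) j
    if k = 0 then acc
    else
      match tokens[k - 1]? with
      | some t =>
          if pvHd t = some 'B' ∧ pvSfx t = pvSfx tag then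
            PySem.Set.add acc (String.ofList (pvSfx tag), ((k - 1 : Nat) : Int) - 1, (j : Int))
          else acc
      | none => acc
  else acc

def pvAltLoop (tokens : List String) (j : Nat) (acc : List (String × Int × Int)) :
    List (String × Int × Int) :=
  match _h : tokens[j]? with
  | some tag => pvAltLoop tokens (j + 1) (pvStepB tokens acc j tag)
  | none => acc
termination_by tokens.length - j
decreasing_by
  have : j < tokens.length := by
    by_contra hc; simp [List.getElem?_eq_none (le_of_not_gt hc)] at _h
  omega

def extract_chunk_py_alt (tokens : List String) : List (String × Int × Int) :=
  pvAltLoop tokens 0 PySem.Set.empty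

-- ===== PRECONDITION & SPEC =====
-- Pre_ excludes lists containing the empty string, on which Python A raises IndexError (tag[0]).
def Pre_extract_chunk_py (tokens : List String) : Prop := ∀ t ∈ tokens, t ≠ ""
instance (tokens : List String) : Decidable (Pre_extract_chunk_py tokens) := by
  unfold Pre_extract_chunk_py; infer_instance

def pvWitness_extract_chunk_py : List String := ["B-PER", "I-PER", "E-PER", "S-LOC", "O"]

def Spec_extract_chunk_py (tokens : List String) (out : List (String × Int × Int)) : Prop :=
  out = extract_chunk_py_alt tokens
instance (tokens : List String) (out : List (String × Int × Int)) :
    Decidable (Spec_extract_chunk_py tokens out) := by unfold Spec_extract_chunk_py; infer_instance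

-- ===== CLAIM (what is proved, stated in full; the proofs are below) =====
def Claim_equal_extract_chunk_py : Prop :=
  ∀ (tokens : List String), Dom_extract_chunk_py tokens → Pre_extract_chunk_py tokens →
    Spec_extract_chunk_py tokens (extract_chunk_py tokens)

-- ===== LEMMAS AND PROOFS =====

-- token at m, the empty string past the end (pvHd "" = none, so it never matches a tag test)
def pvTok (tokens : List String) (m : Nat) : String := tokens.getD m ""

def pvIMatch (tokens : List String) (suf : List Char) (m : Nat) : Prop :=
  pvHd (pvTok tokens m) = some 'I' ∧ pvSfx (pvTok tokens m) = suf

-- a complete B..I*..E chunk ending at j with its B at i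
def pvChain (tokens : List String) (i j : Nat) : Prop :=
  pvHd (pvTok tokens j) = some 'E' ∧ pvHd (pvTok tokens i) = some 'B' ∧
    pvSfx (pvTok tokens i) = pvSfx (pvTok tokens j) ∧
    ∀ k, i < k → k < j → pvIMatch tokens (pvSfx (pvTok tokens j)) k

-- no chunk ending at or after c reaches back before c
def pvNoLive (tokens : List String) (c : Nat) : Prop :=
  ∀ i j, i < c → c ≤ j → j < tokens.length → ¬ pvChain tokens i j

lemma pvTok_eq (tokens : List String) (m : Nat) (t : String) (h : tokens[m]? = some t) :
    pvTok tokens m = t := by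
  simp [pvTok, List.getD, h]

lemma pvHd_some_getElem? (tokens : List String) (m : Nat) (c : Char)
    (h : pvHd (pvTok tokens m) = some c) : tokens[m]? = some (pvTok tokens m) := by
  cases hm : tokens[m]? with
  | some t => rw [pvTok_eq tokens m t hm]
  | none =>
      exfalso
      have : pvTok tokens m = "" := by simp [pvTok, List.getD, hm]
      rw [this] at h
      rw [show pvHd "" = none from by decide] at h
      exact (Option.some_ne_none c h.symm)



lemma pvAltLoop_some (tokens : List String) (j : Nat) (acc : List (String × Int × Int))
    (tag : String) (h : tokens[j]? = some tag) :
    pvAltLoop tokens j acc = pvAltLoop tokens (j + 1) (pvStepB tokens acc j tag) := by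
  rw [pvAltLoop.eq_def]
  split <;> simp_all

lemma pvLoopA_none (tokens : List String) (c : Nat) (acc : List (String × Int × Int))
    (h : tokens[c]? = none) : pvLoopA tokens c acc = acc := by
  rw [pvLoopA.eq_def]
  split <;> simp_all

lemma pvLoopA_B_E (tokens : List String) (c : Nat) (acc : List (String × Int × Int))
    (t u : String) (h : tokens[c]? = some t) (_hB : pvHd t = some 'B')
    (h2 : tokens[pvInnerA tokens (pvSfx t) (c + 1)]? = some u)
    (hEm : pvHd u = some 'E' ∧ pvSfx u = pvSfx t) :
    pvLoopA tokens c acc =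
      pvLoopA tokens (pvInnerA tokens (pvSfx t) (c + 1) + 1)
        (PySem.Set.add acc
          (String.ofList (pvSfx u), (c : Int) - 1, (pvInnerA tokens (pvSfx t) (c + 1) : Int))) := by
  rw [pvLoopA.eq_def]
  split
  case h_1 heq => simp [h] at heq
  case h_2 t' heq =>
    rw [h] at heq
    injection heq with heq'
    subst heq'
    split <;> try simp_all
    all_goals (split <;> simp_all)

lemma pvLoopA_B_noE (tokens : List String) (c : Nat) (acc : List (String × Int × Int))
    (t u : String) (h : tokens[c]? = some t) (_hB : pvHd t = some 'B')
    (h2 : tokens[pvInnerA tokens (pvSfx t) (c + 1)]? = some u)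
    (hEm : ¬ (pvHd u = some 'E' ∧ pvSfx u = pvSfx t)) :
    pvLoopA tokens c acc = pvLoopA tokens (pvInnerA tokens (pvSfx t) (c + 1)) acc := by
  rw [pvLoopA.eq_def]
  split
  case h_1 heq => simp [h] at heq
  case h_2 t' heq =>
    rw [h] at heq
    injection heq with heq'
    subst heq'
    split <;> try simp_all
    all_goals (split <;> simp_all)

lemma pvLoopA_B_end (tokens : List String) (c : Nat) (acc : List (String × Int × Int))
    (t : String) (h : tokens[c]? = some t) (_hB : pvHd t = some 'B')
    (h2 : tokens[pvInnerA tokens (pvSfx t) (c + 1)]? = none) :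
    pvLoopA tokens c acc = acc := by
  rw [pvLoopA.eq_def]
  split
  case h_1 heq => simp [h] at heq
  case h_2 t' heq =>
    rw [h] at heq
    injection heq with heq'
    subst heq'
    split <;> try simp_all
    all_goals (split <;> simp_all)

lemma pvLoopA_S (tokens : List String) (c : Nat) (acc : List (String × Int × Int))
    (t : String) (h : tokens[c]? = some t) (_hB : ¬ pvHd t = some 'B') (hS : pvHd t = some 'S') :
    pvLoopA tokens c acc =
      pvLoopA tokens (c + 1)
        (PySem.Set.add acc (String.ofList (pvSfx t), (c : Int) - 1, (c : Int))) := by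
  rw [pvLoopA.eq_def]
  split <;> simp_all

lemma pvLoopA_other (tokens : List String) (c : Nat) (acc : List (String × Int × Int))
    (t : String) (h : tokens[c]? = some t) (hB : ¬ pvHd t = some 'B') (hS : ¬ pvHd t = some 'S') :
    pvLoopA tokens c acc = pvLoopA tokens (c + 1) acc := by
  rw [pvLoopA.eq_def]
  split <;> simp_all

lemma pvInnerA_mem (tokens : List String) (suf : List Char) :
    ∀ cur m, cur ≤ m → m < pvInnerA tokens suf cur → pvIMatch tokens suf m := by
  intro cur
  fun_induction pvInnerA tokens suf cur with
  | case1 cur t h hm ih =>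
      intro m h1 h2
      rcases Nat.eq_or_lt_of_le h1 with h1' | h1'
      · subst h1'
        exact ⟨by rw [pvTok_eq tokens cur t h]; exact hm.1, by rw [pvTok_eq tokens cur t h]; exact hm.2⟩
      · exact ih m h1' h2
  | case2 cur t h hm => intro m h1 h2; omega
  | case3 cur h => intro m h1 h2; omega

lemma pvInnerA_le (tokens : List String) (suf : List Char) :
    ∀ cur, cur ≤ tokens.length → pvInnerA tokens suf cur ≤ tokens.length := by
  intro cur
  fun_induction pvInnerA tokens suf cur with
  | case1 cur t h hm ih =>
      intro _
      have hlt : cur < tokens.length := by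
        by_contra hc; simp [List.getElem?_eq_none (le_of_not_gt hc)] at h
      exact ih (by omega)
  | case2 cur t h hm => intro h'; exact h'
  | case3 cur h => intro h'; exact h'

lemma pvInnerA_stop (tokens : List String) (suf : List Char) (cur : Nat) :
    ∀ u, tokens[pvInnerA tokens suf cur]? = some u → ¬ (pvHd u = some 'I' ∧ pvSfx u = suf) := by
  fun_induction pvInnerA tokens suf cur with
  | case1 cur t h hm ih => exact ih
  | case2 cur t h hm =>
      intro u hu
      rw [h] at hu
      injection hu with hu'
      subst hu'
      exact hm
  | case3 cur h => intro u hu; rw [h] at hu; cases hu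

lemma pvBackB_le (tokens : List String) (suf : List Char) (k : Nat) :
    pvBackB tokens suf k ≤ k := by
  fun_induction pvBackB tokens suf k <;> omega

lemma pvBackB_mem (tokens : List String) (suf : List Char) :
    ∀ k m, pvBackB tokens suf k ≤ m → m < k → pvIMatch tokens suf m := by
  intro k
  fun_induction pvBackB tokens suf k with
  | case1 => intro m h1 h2; omega
  | case2 i t h hm ih =>
      intro m h1 h2
      rcases Nat.lt_or_ge m i with h3 | h3
      · exact ih m h1 h3
      · have : m = i := by omega
        subst this
        exact ⟨by rw [pvTok_eq tokens m t h]; exact hm.1, by rw [pvTok_eq tokens m t h]; exact hm.2⟩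
  | case3 i t h hm => intro m h1 h2; omega
  | case4 i h => intro m h1 h2; omega

lemma pvBackB_of_run (tokens : List String) (suf : List Char) (i : Nat) :
    ∀ j, i < j → (∀ m, i < m → m < j → pvIMatch tokens suf m) → ¬ pvIMatch tokens suf i →
      pvBackB tokens suf j = i + 1 := by
  intro j
  fun_induction pvBackB tokens suf j with
  | case1 => intro h _ _; omega
  | case2 i' t hg hm ih =>
      intro hij hrun hstop
      rcases Nat.lt_or_ge i i' with h3 | h3
      · exact ih h3 (fun m hm1 hm2 => hrun m hm1 (by omega)) hstop
      · -- i = i' : the while condition would hold at i, contradicting hstop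
        have : i = i' := by omega
        subst this
        exact absurd ⟨by rw [pvTok_eq tokens i t hg]; exact hm.1,
                      by rw [pvTok_eq tokens i t hg]; exact hm.2⟩ hstop
  | case3 i' t hg hm =>
      intro hij hrun _
      rcases Nat.lt_or_ge i i' with h3 | h3
      · -- the run says i' matches, contradicting the stop at i'
        have h4 := hrun i' h3 (by omega)
        simp only [pvIMatch] at h4
        rw [pvTok_eq tokens i' t hg] at h4
        exact absurd h4 hm
      · omega
  | case4 i' hg =>
      intro hij hrun _
      rcases Nat.lt_or_ge i i' with h3 | h3
      · have h4 := hrun i' h3 (by omega)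
        have := pvHd_some_getElem? tokens i' 'I' h4.1
        rw [hg] at this
        cases this
      · omega

lemma pvStepB_other (tokens : List String) (acc : List (String × Int × Int)) (j : Nat)
    (tag : String) (hS : ¬ pvHd tag = some 'S') (hE : ¬ pvHd tag = some 'E') :
    pvStepB tokens acc j tag = acc := by
  simp [pvStepB, hS, hE]

lemma pvStepB_noChain (tokens : List String) (acc : List (String × Int × Int)) (j : Nat)
    (tag : String) (hj : tokens[j]? = some tag) (hE : pvHd tag = some 'E')
    (hnc : ∀ i, i < j → ¬ pvChain tokens i j) : pvStepB tokens acc j tag = acc := by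
  have hS : ¬ pvHd tag = some 'S' := by rw [hE]; simp
  unfold pvStepB
  rw [if_neg hS, if_pos hE]
  simp only []
  by_cases hk0 : pvBackB tokens (pvSfx tag) j = 0
  · rw [if_pos hk0]
  · rw [if_neg hk0]
    cases hg : tokens[pvBackB tokens (pvSfx tag) j - 1]? with
    | none => rfl
    | some t =>
        have hc : ¬ (pvHd t = some 'B' ∧ pvSfx t = pvSfx tag) := by
          intro hc
          have hkj : pvBackB tokens (pvSfx tag) j ≤ j := pvBackB_le tokens (pvSfx tag) j
          refine hnc (pvBackB tokens (pvSfx tag) j - 1) (by omega) ?_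
          refine ⟨by rw [pvTok_eq tokens j tag hj]; exact hE,
                  by rw [pvTok_eq tokens _ t hg]; exact hc.1,
                  by rw [pvTok_eq tokens _ t hg, pvTok_eq tokens j tag hj]; exact hc.2, ?_⟩
          intro m hm1 hm2
          rw [pvTok_eq tokens j tag hj]
          exact pvBackB_mem tokens (pvSfx tag) j m (by omega) hm2
        simp only [hc, if_false]

lemma pvStepB_chain (tokens : List String) (acc : List (String × Int × Int)) (i j : Nat)
    (tag : String) (hj : tokens[j]? = some tag) (hE : pvHd tag = some 'E')
    (hij : i < j) (hch : pvChain tokens i j) :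
    pvStepB tokens acc j tag =
      PySem.Set.add acc (String.ofList (pvSfx tag), (i : Int) - 1, (j : Int)) := by
  obtain ⟨hEj, hBi, hsfx, hrun⟩ := hch
  rw [pvTok_eq tokens j tag hj] at hsfx hrun
  have hS : ¬ pvHd tag = some 'S' := by rw [hE]; simp
  have hstop : ¬ pvIMatch tokens (pvSfx tag) i := by
    intro hmm
    rw [hmm.1] at hBi
    simp at hBi
  have hbk : pvBackB tokens (pvSfx tag) j = i + 1 :=
    pvBackB_of_run tokens (pvSfx tag) i j hij hrun hstop
  have hgi : tokens[i]? = some (pvTok tokens i) := pvHd_some_getElem? tokens i 'B' hBi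
  unfold pvStepB
  rw [if_neg hS, if_pos hE]
  simp only [hbk, Nat.add_sub_cancel]
  rw [if_neg (by omega : ¬ i + 1 = 0), hgi]
  simp only [hBi, hsfx, and_self, if_true]

lemma pvAltLoop_none (tokens : List String) (j : Nat) (acc : List (String × Int × Int))
    (h : tokens.length ≤ j) : pvAltLoop tokens j acc = acc := by
  rw [pvAltLoop, List.getElem?_eq_none h]

lemma pvAltLoop_skip (tokens : List String) :
    ∀ b a acc, a ≤ b →
      (∀ m, a ≤ m → m < b → ¬ pvHd (pvTok tokens m) = some 'S' ∧ ¬ pvHd (pvTok tokens m) = some 'E') →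
      pvAltLoop tokens a acc = pvAltLoop tokens b acc := by
  intro b
  induction b with
  | zero =>
      intro a acc h1 _
      have : a = 0 := by omega
      subst this; rfl
  | succ b ih =>
      intro a acc h1 h2
      rcases Nat.eq_or_lt_of_le h1 with h1' | h1'
      · subst h1'; rfl
      · have hab : a ≤ b := by omega
        rw [ih a acc hab (fun m hm1 hm2 => h2 m hm1 (by omega))]
        cases hg : tokens[b]? with
        | none =>
            have hlen : tokens.length ≤ b := List.getElem?_eq_none_iff.mp hg
            rw [pvAltLoop_none tokens b acc hlen, pvAltLoop_none tokens (b + 1) acc (by omega)]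
        | some tag =>
            rw [pvAltLoop_some tokens b acc tag hg]
            have h3 := h2 b hab (by omega)
            rw [pvTok_eq tokens b tag hg] at h3
            rw [pvStepB_other tokens acc b tag h3.1 h3.2]

lemma pvMain (tokens : List String) :
    ∀ d c acc, tokens.length - c ≤ d → pvNoLive tokens c →
      pvLoopA tokens c acc = pvAltLoop tokens c acc := by
  intro d
  induction d with
  | zero =>
      intro c acc hd _
      have hc : tokens.length ≤ c := by omega
      rw [pvLoopA_none tokens c acc (List.getElem?_eq_none hc), pvAltLoop_none tokens c acc hc]
  | succ d ih =>
      intro c acc hd hnl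
      cases hc : tokens[c]? with
      | none =>
          have hlen : tokens.length ≤ c := List.getElem?_eq_none_iff.mp hc
          rw [pvLoopA_none tokens c acc hc, pvAltLoop_none tokens c acc hlen]
      | some t =>
          have hcl : c < tokens.length := by
            by_contra h'; simp [List.getElem?_eq_none (le_of_not_gt h')] at hc
          by_cases hB : pvHd t = some 'B'
          · -- B branch: A consumes the I-run; on the alt side those positions emit nothing
            have hge := pvInnerA_ge tokens (pvSfx t) (c + 1)
            have hle := pvInnerA_le tokens (pvSfx t) (c + 1) (by omega)
            have hskip : pvAltLoop tokens c acc =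
                pvAltLoop tokens (pvInnerA tokens (pvSfx t) (c + 1)) acc := by
              apply pvAltLoop_skip tokens (pvInnerA tokens (pvSfx t) (c + 1)) c acc (by omega)
              intro m hm1 hm2
              rcases Nat.eq_or_lt_of_le hm1 with hm' | hm'
              · subst hm'
                constructor <;> (rw [pvTok_eq tokens c t hc, hB]; simp)
              · have him := pvInnerA_mem tokens (pvSfx t) (c + 1) m (by omega) hm2
                constructor <;> (rw [him.1]; simp)
            cases h2 : tokens[pvInnerA tokens (pvSfx t) (c + 1)]? with
            | none =>
                rw [pvLoopA_B_end tokens c acc t hc hB h2, hskip,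
                    pvAltLoop_none tokens _ acc (List.getElem?_eq_none_iff.mp h2)]
            | some u =>
                have hnxt : pvInnerA tokens (pvSfx t) (c + 1) < tokens.length := by
                  by_contra h'; simp [List.getElem?_eq_none (le_of_not_gt h')] at h2
                by_cases hEm : pvHd u = some 'E' ∧ pvSfx u = pvSfx t
                · -- complete chunk
                  have hch : pvChain tokens c (pvInnerA tokens (pvSfx t) (c + 1)) := by
                    refine ⟨by rw [pvTok_eq tokens _ u h2]; exact hEm.1,
                            by rw [pvTok_eq tokens c t hc]; exact hB,
                            by rw [pvTok_eq tokens c t hc, pvTok_eq tokens _ u h2]; exact hEm.2.symm,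
                            ?_⟩
                    intro k hk1 hk2
                    have him := pvInnerA_mem tokens (pvSfx t) (c + 1) k (by omega) hk2
                    rw [pvTok_eq tokens _ u h2, hEm.2]
                    exact him
                  rw [pvLoopA_B_E tokens c acc t u hc hB h2 hEm, hskip,
                      pvAltLoop_some tokens _ acc u h2,
                      pvStepB_chain tokens acc c (pvInnerA tokens (pvSfx t) (c + 1)) u h2 hEm.1
                        (by omega) hch]
                  apply ih (pvInnerA tokens (pvSfx t) (c + 1) + 1) _ (by omega)
                  intro i j hi hj hjn hchain
                  obtain ⟨hEj, hBi, hsfxij, hrunj⟩ := hchain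
                  rcases Nat.lt_or_ge i c with hic | hic
                  · exact hnl i j hic (by omega) hjn ⟨hEj, hBi, hsfxij, hrunj⟩
                  rcases Nat.eq_or_lt_of_le hic with hic' | hic'
                  · -- i = c : the run would have to cross the E at nxt
                    have hr := hrunj (pvInnerA tokens (pvSfx t) (c + 1)) (by omega) (by omega)
                    simp only [pvIMatch] at hr
                    rw [pvTok_eq tokens _ u h2] at hr
                    rw [hr.1] at hEm
                    simp at hEm
                  rcases Nat.lt_or_ge i (pvInnerA tokens (pvSfx t) (c + 1)) with hin | hin
                  · have him := pvInnerA_mem tokens (pvSfx t) (c + 1) i (by omega) hin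
                    rw [him.1] at hBi
                    simp at hBi
                  · have : i = pvInnerA tokens (pvSfx t) (c + 1) := by omega
                    subst this
                    rw [pvTok_eq tokens _ u h2] at hBi
                    rw [hBi] at hEm
                    simp at hEm
                · -- no complete chunk at the stop position
                  rw [pvLoopA_B_noE tokens c acc t u hc hB h2 hEm, hskip]
                  apply ih (pvInnerA tokens (pvSfx t) (c + 1)) acc (by omega)
                  intro i j hi hj hjn hchain
                  obtain ⟨hEj, hBi, hsfxij, hrunj⟩ := hchain
                  rcases Nat.lt_or_ge i c with hic | hic
                  · exact hnl i j hic (by omega) hjn ⟨hEj, hBi, hsfxij, hrunj⟩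
                  rcases Nat.eq_or_lt_of_le hic with hic' | hic'
                  · -- i = c
                    subst hic'
                    rcases Nat.eq_or_lt_of_le hj with hj' | hj'
                    · -- j = nxt : then u would be a matching E, contradicting hEm
                      subst hj'
                      rw [pvTok_eq tokens _ u h2] at hEj hsfxij
                      rw [pvTok_eq tokens c t hc] at hsfxij
                      exact hEm ⟨hEj, hsfxij.symm⟩
                    · -- j > nxt : the run says nxt is a matching I, contradicting pvInnerA_stop
                      have hr := hrunj (pvInnerA tokens (pvSfx t) (c + 1)) (by omega) (by omega)
                      simp only [pvIMatch] at hr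
                      rw [← hsfxij, pvTok_eq tokens c t hc, pvTok_eq tokens _ u h2] at hr
                      exact pvInnerA_stop tokens (pvSfx t) (c + 1) u h2 hr
                  · have him := pvInnerA_mem tokens (pvSfx t) (c + 1) i (by omega) (by omega)
                    rw [him.1] at hBi
                    simp at hBi
          · by_cases hS : pvHd t = some 'S'
            · have hstepS : pvStepB tokens acc c t =
                  PySem.Set.add acc (String.ofList (pvSfx t), (c : Int) - 1, (c : Int)) := by
                unfold pvStepB
                rw [if_pos hS]
              rw [pvLoopA_S tokens c acc t hc hB hS, pvAltLoop_some tokens c acc t hc, hstepS]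
              apply ih (c + 1) _ (by omega)
              intro i j hi hj hjn hchain
              rcases Nat.lt_or_ge i c with hic | hic
              · exact hnl i j hic (by omega) hjn hchain
              · have : i = c := by omega
                subst this
                have hBc := hchain.2.1
                rw [pvTok_eq tokens _ t hc] at hBc
                rw [hBc] at hS
                simp at hS
            · have hstep : pvStepB tokens acc c t = acc := by
                by_cases hE : pvHd t = some 'E'
                · exact pvStepB_noChain tokens acc c t hc hE
                    (fun i hi => hnl i c hi (le_refl c) hcl)
                · exact pvStepB_other tokens acc c t hS hE
              rw [pvLoopA_other tokens c acc t hc hB hS, pvAltLoop_some tokens c acc t hc, hstep]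
              apply ih (c + 1) acc (by omega)
              intro i j hi hj hjn hchain
              rcases Nat.lt_or_ge i c with hic | hic
              · exact hnl i j hic (by omega) hjn hchain
              · have : i = c := by omega
                subst this
                have hBc := hchain.2.1
                rw [pvTok_eq tokens _ t hc] at hBc
                rw [hBc] at hB
                simp at hB

theorem extract_chunk_py_spec : Claim_equal_extract_chunk_py := by
  intro tokens _dom _pre
  unfold Spec_extract_chunk_py extract_chunk_py extract_chunk_py_alt
  exact pvMain tokens tokens.length 0 PySem.Set.empty (by omega) (by intro i j hi _ _ _; omega)
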